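-- pv_equiv track=rewrite | github.com/arminale/advent_of_code | 2023/7/1/anwer.py | get_hand_value
-- ===== SOURCE A (Python) =====
-- def get_hand_value(hand: str) -> int:
--     card_values = {"T": 10, "J": 11, "Q": 12, "K": 13, "A": 14}
--     card_values = card_values | {str(x): x for x in range(2, 10)}
--     value = 0
--     for card in hand:
--         value += card_values[card]
--         value *= 100
--     return value
-- ===== SOURCE B (Python) =====
-- def get_hand_value(hand: str) -> int:
--     card_values = {"2": 2, "3": 3, "4": 4, "5": 5, "6": 6, "7": 7, "8": 8,
--                    "9": 9, "T": 10, "J": 11, "Q": 12, "K": 13, "A": 14}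
--     return sum(card_values[card] * 100 ** (len(hand) - i)
--                for i, card in enumerate(hand))
-- ===== Notes on version B (the rewrite author's own statement) =====
-- stated objective: alternative
-- what changed: Replaces the Horner-style running accumulator loop (add card value, multiply by 100 each step) with a direct positional power sum: each card's value times 100^(len(hand)-i), summed over enumerate(hand).
import Mathlib
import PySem

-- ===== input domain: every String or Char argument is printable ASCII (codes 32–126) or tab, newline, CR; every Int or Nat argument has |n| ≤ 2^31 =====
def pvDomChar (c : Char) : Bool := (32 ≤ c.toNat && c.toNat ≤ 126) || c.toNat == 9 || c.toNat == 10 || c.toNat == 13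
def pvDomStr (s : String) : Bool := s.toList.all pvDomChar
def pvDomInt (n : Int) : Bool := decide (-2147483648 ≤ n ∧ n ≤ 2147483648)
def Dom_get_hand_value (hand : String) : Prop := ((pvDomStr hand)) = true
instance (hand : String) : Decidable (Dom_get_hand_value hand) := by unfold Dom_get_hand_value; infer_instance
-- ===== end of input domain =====

-- B replaces A's Horner-style accumulator loop with a direct positional power sum
-- (card value times 100^(len-i), summed over enumerate); same values, alternative decomposition.

-- ===== PORT A =====
-- card_values = {"T":10,...} | {str(x): x for x in range(2,10)}
def pvCardValuesA : PySem.Dict String Int :=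
  (PySem.List.pyRange 2 10 1).foldl
    (fun d x => d.insert (PySem.Int.toStr x) x)
    (PySem.Dict.ofList [("T", 10), ("J", 11), ("Q", 12), ("K", 13), ("A", 14)])

-- card_values[card]; KeyError (none) is excluded by Pre_, the default 0 is never used there
def pvValA (card : Char) : Int := (pvCardValuesA.get? (String.ofList [card])).getD 0

def get_hand_value (hand : String) : Int :=
  hand.toList.foldl (fun value card => (value + pvValA card) * 100) 0

-- ===== PORT B =====
def pvCardValuesB : PySem.Dict String Int :=
  PySem.Dict.ofList [("2", 2), ("3", 3), ("4", 4), ("5", 5), ("6", 6), ("7", 7),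
                     ("8", 8), ("9", 9), ("T", 10), ("J", 11), ("Q", 12), ("K", 13), ("A", 14)]

def pvValB (card : Char) : Int := (pvCardValuesB.get? (String.ofList [card])).getD 0

def get_hand_value_alt (hand : String) : Int :=
  ((PySem.List.enumerate hand.toList 0).map
    (fun p => pvValB p.2 * (100 : Int) ^ (((hand.toList.length : Int) - p.1).toNat))).sum

-- ===== PRECONDITION & SPEC =====
-- the thirteen card characters
def pvCards : List Char := ['2','3','4','5','6','7','8','9','T','J','Q','K','A']

-- Pre_ excludes hands containing a character that is not a card key: there A (and B) raise KeyError.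
def Pre_get_hand_value (hand : String) : Prop :=
  hand.toList.all (fun c => pvCards.contains c) = true
instance (hand : String) : Decidable (Pre_get_hand_value hand) := by
  unfold Pre_get_hand_value; infer_instance

def pvWitness_get_hand_value : String := "A2TQ"

def Spec_get_hand_value (hand : String) (out : Int) : Prop := out = get_hand_value_alt hand
instance (hand : String) (out : Int) : Decidable (Spec_get_hand_value hand out) := by unfold Spec_get_hand_value; infer_instance

-- ===== CLAIM (what is proved, stated in full; the proofs are below) =====
def Claim_equal_get_hand_value : Prop := ∀ (hand : String), Dom_get_hand_value hand → Pre_get_hand_value hand → Spec_get_hand_value hand (get_hand_value hand)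

-- ===== LEMMAS AND PROOFS =====

-- canonical positional sum both ports are reduced to
def pvHS : List Char → Int
  | [] => 0
  | c :: t => pvValB c * (100 : Int) ^ (t.length + 1) + pvHS t

theorem pvVal_eq : ∀ c ∈ pvCards, pvValA c = pvValB c := by
  intro c hc
  fin_cases hc <;> decide

theorem pvA_foldl (l : List Char) (h : ∀ c ∈ l, c ∈ pvCards) (v : Int) :
    l.foldl (fun value card => (value + pvValA card) * 100) v
      = v * (100 : Int) ^ l.length + pvHS l := by
  induction l generalizing v with
  | nil => simp [pvHS]
  | cons c t ih =>
    simp only [List.foldl_cons, List.length_cons, pvHS]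
    rw [ih (fun x hx => h x (List.mem_cons_of_mem _ hx)),
        pvVal_eq c (h c (List.mem_cons_self ..))]
    ring

theorem pvB_sum (t : List Char) (k : Int) (hk : 0 ≤ k) :
    ((PySem.List.enumerate t k).map
      (fun p => pvValB p.2 * (100 : Int) ^ ((k + (t.length : Int) - p.1).toNat))).sum
      = pvHS t := by
  induction t generalizing k with
  | nil => simp [PySem.List.enumerate_nil, pvHS]
  | cons c t ih =>
    rw [PySem.List.enumerate_cons]
    simp only [List.map_cons, List.sum_cons, List.length_cons, pvHS]
    have h1 : (k + ((t.length : Int) + 1) - k).toNat = t.length + 1 := by omega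
    have h2 : ∀ p : Int × Char,
        k + (((t.length + 1 : Nat) : Int)) - p.1 = (k + 1) + (t.length : Int) - p.1 := by
      intro p; push_cast; ring
    push_cast
    rw [h1]
    have := ih (k + 1) (by omega)
    calc pvValB c * (100 : Int) ^ (t.length + 1) +
          ((PySem.List.enumerate t (k + 1)).map
            (fun p => pvValB p.2 * (100 : Int) ^ ((k + ((t.length : Int) + 1) - p.1).toNat))).sum
        = pvValB c * (100 : Int) ^ (t.length + 1) +
          ((PySem.List.enumerate t (k + 1)).map
            (fun p => pvValB p.2 * (100 : Int) ^ (((k + 1) + (t.length : Int) - p.1).toNat))).sum := by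
          congr 1
          apply congrArg
          apply List.map_congr_left
          intro p _
          congr 2
          omega
      _ = pvValB c * (100 : Int) ^ (t.length + 1) + pvHS t := by rw [this]

-- ===== VERDICT (by name: the statement is the Claim_ definition above) =====
theorem get_hand_value_spec : Claim_equal_get_hand_value := by
  intro hand _ hpre
  unfold Pre_get_hand_value at hpre
  rw [List.all_eq_true] at hpre
  replace hpre : ∀ c ∈ hand.toList, c ∈ pvCards := fun c hc => by
    simpa using hpre c hc
  unfold Spec_get_hand_value get_hand_value get_hand_value_alt
  rw [pvA_foldl hand.toList hpre 0]
  have := pvB_sum hand.toList 0 le_rfl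
  simp only [zero_add] at this
  rw [this]
  ring
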